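-- pv_equiv track=rewrite | github.com/Davicks3/ESD123 | Python_Vinkel_Peakdetection/Peak_finder.py | _identify_peak_indicies
-- ===== SOURCE A (Python) =====
-- def _identify_peak_indicies(signal, support=2):
--     peaks = []
--     for i in range(support, len(signal)-support):
--         res = True
--         res &= all(signal[j] < signal[j+1] for j in range(i-support, i))
--         res &= all(signal[j+1] < signal[j] for j in range(i, i+support))
--         if res:
--             peaks.append(i)
--     out = []
--     for i in peaks:
--         if signal[i-1] > signal[i+1]:
--             out.append((i-1, i))
--         else:
--             out.append((i, i+1))
--     return out
-- ===== SOURCE B (Python) =====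
-- def _runs_up(sig):
--     # r[i] = length of the strictly increasing run ending at index i
--     r = []
--     k = 0
--     prev = None
--     for x in sig:
--         k = k + 1 if prev is not None and prev < x else 0
--         r.append(k)
--         prev = x
--     return r
--
--
-- def _identify_peak_indicies(sig, support=2):
--     n = len(sig)
--     inc = _runs_up(sig)
--     dec = _runs_up(sig[::-1])[::-1]
--     out = []
--     for i in range(support, n - support):
--         if inc[i] >= support and dec[i] >= support:
--             if sig[i - 1] > sig[i + 1]:
--                 out.append((i - 1, i))
--             else:
--                 out.append((i, i + 1))
--     return out
-- ===== Notes on version B (the rewrite author's own statement) =====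
-- stated objective: faster
-- what changed: Replaces the per-index inner scans of width `support` by two precomputed run-length arrays (length of strictly increasing run ending at i, and of strictly decreasing run starting at i), making each peak test O(1), and merges the peak-collection and pair-building passes into one loop.
import Mathlib
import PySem

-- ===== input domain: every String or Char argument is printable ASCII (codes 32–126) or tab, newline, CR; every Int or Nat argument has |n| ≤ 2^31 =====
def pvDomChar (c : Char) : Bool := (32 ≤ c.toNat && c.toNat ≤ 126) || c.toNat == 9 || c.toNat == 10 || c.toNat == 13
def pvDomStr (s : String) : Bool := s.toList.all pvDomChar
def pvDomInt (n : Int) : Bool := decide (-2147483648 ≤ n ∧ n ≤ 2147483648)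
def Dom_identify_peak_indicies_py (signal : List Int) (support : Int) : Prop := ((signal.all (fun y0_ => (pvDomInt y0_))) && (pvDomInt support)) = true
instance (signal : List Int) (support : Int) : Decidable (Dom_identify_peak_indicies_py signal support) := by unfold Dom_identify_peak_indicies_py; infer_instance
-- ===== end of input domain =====

-- B replaces A's O(support) inner scans per index by two precomputed run-length lists, making each
-- peak test O(1), and merges A's two output passes into one loop (objective: faster, asymptotic).

-- ===== PORT A =====
-- literal transliteration of _identify_peak_indicies (Python tuples (a, b) are rendered [a, b])
def identify_peak_indicies_py (signal : List Int) (support : Int) : List (List Int) :=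
  let peaks : List Int :=
    (PySem.List.pyRange support ((signal.length : Int) - support) 1).foldl
      (fun peaks i =>
        let res := true
        let res := res && ((PySem.List.pyRange (i - support) i 1).all
          (fun j => decide (PySem.List.pyGetD signal j 0 < PySem.List.pyGetD signal (j + 1) 0)))
        let res := res && ((PySem.List.pyRange i (i + support) 1).all
          (fun j => decide (PySem.List.pyGetD signal (j + 1) 0 < PySem.List.pyGetD signal j 0)))
        if res then peaks ++ [i] else peaks) []
  peaks.foldl
    (fun out i =>
      if PySem.List.pyGetD signal (i - 1) 0 > PySem.List.pyGetD signal (i + 1) 0 then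
        out ++ [[i - 1, i]]
      else
        out ++ [[i, i + 1]]) []

-- ===== PORT B =====
-- _runs_up: r[i] = length of the strictly increasing run ending at index i
def runsUp (signal : List Int) : List Int :=
  (signal.foldl
    (fun (st : List Int × Int × Option Int) x =>
      let k : Int :=
        match st.2.2 with
        | some p => if p < x then st.2.1 + 1 else 0
        | none => 0
      (st.1 ++ [k], k, some x)) ([], 0, none)).1

def identify_peak_indicies_py_alt (signal : List Int) (support : Int) : List (List Int) :=
  let inc := runsUp signal
  let dec := (runsUp signal.reverse).reverse
  (PySem.List.pyRange support ((signal.length : Int) - support) 1).foldl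
    (fun out i =>
      if support ≤ PySem.List.pyGetD inc i 0 ∧ support ≤ PySem.List.pyGetD dec i 0 then
        if PySem.List.pyGetD signal (i - 1) 0 > PySem.List.pyGetD signal (i + 1) 0 then
          out ++ [[i - 1, i]]
        else
          out ++ [[i, i + 1]]
      else out) []

-- ===== PRECONDITION & SPEC =====
-- Pre_ excludes exactly the inputs on which the Python A raises IndexError: support ≤ 0 makes the
-- peak range trivially true and the pair-building step index out of range (except when it is empty:
-- support = 0 on the empty signal, which A accepts and is kept inside Pre_).
def Pre_identify_peak_indicies_py (signal : List Int) (support : Int) : Prop :=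
  1 ≤ support ∨ (support = 0 ∧ signal = [])
instance (signal : List Int) (support : Int) : Decidable (Pre_identify_peak_indicies_py signal support) := by unfold Pre_identify_peak_indicies_py; infer_instance
def pvWitness_identify_peak_indicies_py : List Int × Int := ([1, 3, 1, 0], 2)
def Spec_identify_peak_indicies_py (signal : List Int) (support : Int) (out : List (List Int)) : Prop := out = identify_peak_indicies_py_alt signal support
instance (signal : List Int) (support : Int) (out : List (List Int)) : Decidable (Spec_identify_peak_indicies_py signal support out) := by unfold Spec_identify_peak_indicies_py; infer_instance

-- ===== CLAIM (what is proved, stated in full; the proofs are below) =====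
def Claim_equal_identify_peak_indicies_py : Prop := ∀ (signal : List Int) (support : Int), Dom_identify_peak_indicies_py signal support → Pre_identify_peak_indicies_py signal support → Spec_identify_peak_indicies_py signal support (identify_peak_indicies_py signal support)

-- ===== LEMMAS AND PROOFS =====

-- recursion form of runsUp's fold (state: previous run length / previous element)
def rUaux : List Int → Int → Option Int → List Int
  | [], _, _ => []
  | x :: rest, k, prev =>
      let k' : Int :=
        match prev with
        | some p => if p < x then k + 1 else 0
        | none => 0
      k' :: rUaux rest k' (some x)

theorem rUaux_spec (s : List Int) : ∀ (acc : List Int) (k : Int) (p : Option Int),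
    (s.foldl (fun (st : List Int × Int × Option Int) x =>
      let k : Int :=
        match st.2.2 with
        | some p => if p < x then st.2.1 + 1 else 0
        | none => 0
      (st.1 ++ [k], k, some x)) (acc, k, p)).1 = acc ++ rUaux s k p := by
  induction s with
  | nil => intro acc k p; simp [rUaux]
  | cons x rest ih =>
      intro acc k p
      simp only [List.foldl_cons, rUaux]
      rw [ih]
      simp

theorem runsUp_eq (s : List Int) : runsUp s = rUaux s 0 none := by
  unfold runsUp; rw [rUaux_spec]; simp

theorem rUaux_length (s : List Int) : ∀ k p, (rUaux s k p).length = s.length := by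
  induction s with
  | nil => intro k p; rfl
  | cons x rest ih => intro k p; simp [rUaux, ih]

theorem rUaux_nonneg (s : List Int) : ∀ (k : Int) (p : Option Int), 0 ≤ k →
    ∀ e ∈ rUaux s k p, 0 ≤ e := by
  induction s with
  | nil => intro k p _ e he; simp [rUaux] at he
  | cons x rest ih =>
      intro k p hk e he
      simp only [rUaux, List.mem_cons] at he
      rcases he with rfl | he
      · cases p with
        | none => simp
        | some q => dsimp only; split <;> omega
      · refine ih _ _ ?_ e he
        cases p with
        | none => simp
        | some q => dsimp only; split <;> omega

theorem rUaux_getD_zero_none (s : List Int) : (rUaux s 0 none).getD 0 0 = 0 := by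
  cases s <;> rfl

theorem rUaux_rec (s : List Int) : ∀ (k : Int) (p : Option Int) (i : Nat), i + 1 < s.length →
    (rUaux s k p).getD (i + 1) 0 =
      (if s.getD i 0 < s.getD (i + 1) 0 then (rUaux s k p).getD i 0 + 1 else 0) := by
  induction s with
  | nil => intro k p i h; simp at h
  | cons x rest ih =>
      intro k p i h
      cases i with
      | zero =>
          cases rest with
          | nil => simp at h
          | cons y rest' => simp [rUaux]
      | succ i' =>
          simp only [List.length_cons] at h
          simp only [rUaux, List.getD_cons_succ]
          rw [ih _ _ i' (by omega)]

-- characterisation: the run length at i is ≥ kk iff the last kk steps before i strictly increase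
theorem rUaux_char (kk : Nat) : ∀ (i : Nat) (s : List Int), i < s.length →
    ((kk : Int) ≤ (rUaux s 0 none).getD i 0 ↔
      (kk ≤ i ∧ ∀ j : Nat, j < kk → s.getD (i - 1 - j) 0 < s.getD (i - j) 0)) := by
  induction kk with
  | zero =>
      intro i s hi
      constructor
      · intro _; exact ⟨Nat.zero_le _, fun j hj => absurd hj (Nat.not_lt_zero _)⟩
      · intro _
        rcases Nat.lt_or_ge i (rUaux s 0 none).length with h | h
        · exact rUaux_nonneg s 0 none le_rfl _ (by
            rw [List.getD_eq_getElem _ _ h]; exact List.getElem_mem h)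
        · rw [List.getD_eq_default _ _ h]; simp
  | succ kk ih =>
      intro i s hi
      cases i with
      | zero =>
          rw [rUaux_getD_zero_none]
          constructor
          · intro h; exfalso; omega
          · intro ⟨h, _⟩; exfalso; omega
      | succ i' =>
          rw [rUaux_rec s 0 none i' hi]
          by_cases hlt : s.getD i' 0 < s.getD (i' + 1) 0
          · rw [if_pos hlt]
            have := ih i' s (by omega)
            constructor
            · intro h
              have hk : (kk : Int) ≤ (rUaux s 0 none).getD i' 0 := by push_cast at h ⊢; omega
              obtain ⟨h1, h2⟩ := this.mp hk
              refine ⟨by omega, fun j hj => ?_⟩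
              cases j with
              | zero => simpa using hlt
              | succ j' =>
                  have := h2 j' (by omega)
                  have e1 : i' + 1 - 1 - (j' + 1) = i' - 1 - j' := by omega
                  have e2 : i' + 1 - (j' + 1) = i' - j' := by omega
                  rw [e1, e2]; exact this
            · intro ⟨h1, h2⟩
              have hk : (kk : Int) ≤ (rUaux s 0 none).getD i' 0 := by
                refine (this.mpr ⟨by omega, fun j hj => ?_⟩)
                have := h2 (j + 1) (by omega)
                have e1 : i' + 1 - 1 - (j + 1) = i' - 1 - j := by omega
                have e2 : i' + 1 - (j + 1) = i' - j := by omega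
                rw [e1, e2] at this; exact this
              push_cast at hk ⊢; omega
          · rw [if_neg hlt]
            constructor
            · intro h; exfalso; omega
            · intro ⟨h1, h2⟩
              exfalso
              exact hlt (by simpa using h2 0 (by omega))

-- loop-shape lemmas for the two output folds
theorem foldl_pair_if {α : Type} (p : Int → Prop) [DecidablePred p] (f h : Int → α) (l : List Int) :
    ∀ acc : List α,
    l.foldl (fun a i => if p i then a ++ [f i] else a ++ [h i]) acc =
      acc ++ l.map (fun i => if p i then f i else h i) := by
  induction l with
  | nil => intro acc; simp
  | cons x xs ih =>
      intro acc
      simp only [List.foldl_cons, List.map_cons]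
      by_cases hx : p x
      · rw [if_pos hx, ih, if_pos hx]; simp
      · rw [if_neg hx, ih, if_neg hx]; simp

theorem foldl_guard_pair {α : Type} (q : Int → Prop) [DecidablePred q]
    (p : Int → Prop) [DecidablePred p] (f h : Int → α) (l : List Int) :
    ∀ acc : List α,
    l.foldl (fun a i => if q i then (if p i then a ++ [f i] else a ++ [h i]) else a) acc =
      acc ++ (l.filter (fun i => decide (q i))).map (fun i => if p i then f i else h i) := by
  induction l with
  | nil => intro acc; simp
  | cons x xs ih =>
      intro acc
      simp only [List.foldl_cons, List.filter_cons]
      by_cases hx : q x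
      · rw [if_pos hx]
        simp only [hx, decide_true, if_true]
        by_cases hp : p x
        · rw [if_pos hp, ih]; simp [hp]
        · rw [if_neg hp, ih]; simp [hp]
      · rw [if_neg hx]
        simp only [hx, decide_false, Bool.false_eq_true, if_false]
        rw [ih]

-- getD through reversal
theorem getD_reverse (l : List Int) (m : Nat) (h : m < l.length) :
    l.reverse.getD m 0 = l.getD (l.length - 1 - m) 0 := by
  rw [List.getD_eq_getElem?_getD, List.getD_eq_getElem?_getD, List.getElem?_reverse h]

-- re-index A's first inner scan (over Int indices) as a Nat scan counted back from I
theorem all_shift (signal : List Int) (S I : Nat) (hSI : S ≤ I) :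
    (∀ j : Int, (I : Int) - S ≤ j → j < (I : Int) →
        PySem.List.pyGetD signal j 0 < PySem.List.pyGetD signal (j + 1) 0) ↔
      (∀ jj : Nat, jj < S → signal.getD (I - 1 - jj) 0 < signal.getD (I - jj) 0) := by
  constructor
  · intro h jj hjj
    have hj := h ((I - 1 - jj : Nat) : Int) (by omega) (by omega)
    have e : ((I - 1 - jj : Nat) : Int) + 1 = ((I - jj : Nat) : Int) := by omega
    rw [e, PySem.List.pyGetD_natCast, PySem.List.pyGetD_natCast] at hj
    exact hj
  · intro h j h1 h2
    obtain ⟨n, rfl⟩ : ∃ n : Nat, j = (n : Int) := ⟨j.toNat, by omega⟩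
    have e2 : (n : Int) + 1 = ((n + 1 : Nat) : Int) := by push_cast; ring
    rw [e2, PySem.List.pyGetD_natCast, PySem.List.pyGetD_natCast]
    have hh := h (I - 1 - n) (by omega)
    have e3 : I - 1 - (I - 1 - n) = n := by omega
    have e4 : I - (I - 1 - n) = n + 1 := by omega
    rw [e3, e4] at hh
    exact hh

-- re-index A's second inner scan as a Nat scan counted forward from I
theorem all_shift2 (signal : List Int) (S I : Nat) :
    (∀ j : Int, (I : Int) ≤ j → j < (I : Int) + S →
        PySem.List.pyGetD signal (j + 1) 0 < PySem.List.pyGetD signal j 0) ↔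
      (∀ t : Nat, t < S → signal.getD (I + t + 1) 0 < signal.getD (I + t) 0) := by
  constructor
  · intro h t ht
    have hj := h ((I + t : Nat) : Int) (by omega) (by omega)
    have e2 : ((I + t : Nat) : Int) + 1 = ((I + t + 1 : Nat) : Int) := by omega
    rw [e2, PySem.List.pyGetD_natCast, PySem.List.pyGetD_natCast] at hj
    exact hj
  · intro h j h1 h2
    obtain ⟨n, rfl⟩ : ∃ n : Nat, j = (n : Int) := ⟨j.toNat, by omega⟩
    have e2 : (n : Int) + 1 = ((n + 1 : Nat) : Int) := by push_cast; ring
    rw [e2, PySem.List.pyGetD_natCast, PySem.List.pyGetD_natCast]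
    have hh := h (n - I) (by omega)
    have e3 : I + (n - I) = n := by omega
    rw [e3] at hh
    exact hh

-- the two peak tests agree on every index of the loop range
theorem cond_eq (signal : List Int) (support i : Int) (hs : 1 ≤ support)
    (hi : support ≤ i) (hub : i < (signal.length : Int) - support) :
    ((true && ((PySem.List.pyRange (i - support) i 1).all
        (fun j => decide (PySem.List.pyGetD signal j 0 < PySem.List.pyGetD signal (j + 1) 0)))) &&
      ((PySem.List.pyRange i (i + support) 1).all
        (fun j => decide (PySem.List.pyGetD signal (j + 1) 0 < PySem.List.pyGetD signal j 0)))) =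
    decide (support ≤ PySem.List.pyGetD (runsUp signal) i 0 ∧
      support ≤ PySem.List.pyGetD ((runsUp signal.reverse).reverse) i 0) := by
  have hL0 : (0 : Int) ≤ (signal.length : Int) := by positivity
  have hiI : i = ((i.toNat : Nat) : Int) := by omega
  have hsS : support = ((support.toNat : Nat) : Int) := by omega
  set I := i.toNat with hIdef
  set S := support.toNat with hSdef
  set L := signal.length with hLdef
  have hSI : S ≤ I := by omega
  have hISL : I + S < L := by omega
  have hS1 : 1 ≤ S := by omega
  have hIL : I < L := by omega
  -- dec side value
  have hlen : (runsUp signal.reverse).length = L := by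
    rw [runsUp_eq, rUaux_length]; simp [hLdef]
  have hdec : ((runsUp signal.reverse).reverse).getD I 0 =
      (runsUp signal.reverse).getD (L - 1 - I) 0 := by
    rw [getD_reverse _ _ (by rw [hlen]; exact hIL), hlen]
  rw [Bool.true_and, Bool.eq_iff_iff]
  simp only [Bool.and_eq_true, List.all_eq_true, decide_eq_true_eq,
    PySem.List.mem_pyRange_one]
  rw [hiI, hsS]
  simp only [PySem.List.pyGetD_natCast]
  constructor
  · rintro ⟨h1, h2⟩
    constructor
    · -- increasing side
      rw [runsUp_eq]
      refine (rUaux_char S I signal hIL).mpr ⟨hSI, fun j hj => ?_⟩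
      exact (all_shift signal S I hSI).mp (fun j ha hb => h1 j ⟨by omega, by omega⟩) j hj
    · -- decreasing side
      rw [hdec, runsUp_eq]
      refine (rUaux_char S (L - 1 - I) signal.reverse (by simp only [List.length_reverse]; omega)).mpr
        ⟨by omega, fun j hj => ?_⟩
      have hh := (all_shift2 signal S I).mp (fun j ha hb => h2 j ⟨by omega, by omega⟩) j hj
      rw [getD_reverse _ _ (by omega), getD_reverse _ _ (by omega)]
      have e1 : L - 1 - (L - 1 - I - 1 - j) = I + j + 1 := by omega
      have e2 : L - 1 - (L - 1 - I - j) = I + j := by omega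
      rw [← hLdef, e1, e2]
      exact hh
  · rintro ⟨h1, h2⟩
    constructor
    · intro j hj
      rw [runsUp_eq] at h1
      have hc := ((rUaux_char S I signal hIL).mp h1).2
      exact (all_shift signal S I hSI).mpr hc j (by omega) (by omega)
    · intro j hj
      rw [hdec, runsUp_eq] at h2
      have hc := ((rUaux_char S (L - 1 - I) signal.reverse (by simp only [List.length_reverse]; omega)).mp h2).2
      refine (all_shift2 signal S I).mpr (fun t ht => ?_) j (by omega) (by omega)
      have hh := hc t ht
      rw [getD_reverse _ _ (by omega), getD_reverse _ _ (by omega)] at hh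
      have e1 : L - 1 - (L - 1 - I - 1 - t) = I + t + 1 := by omega
      have e2 : L - 1 - (L - 1 - I - t) = I + t := by omega
      rw [← hLdef, e1, e2] at hh
      exact hh

theorem main_eq (signal : List Int) (support : Int) (hs : 1 ≤ support) :
    identify_peak_indicies_py signal support = identify_peak_indicies_py_alt signal support := by
  simp only [identify_peak_indicies_py, identify_peak_indicies_py_alt]
  rw [PySem.List.foldl_append_if_eq_filter, List.nil_append,
    foldl_pair_if (fun i => PySem.List.pyGetD signal (i - 1) 0 > PySem.List.pyGetD signal (i + 1) 0)
      (fun i => [i - 1, i]) (fun i => [i, i + 1]),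
    foldl_guard_pair
      (fun i => support ≤ PySem.List.pyGetD (runsUp signal) i 0 ∧
        support ≤ PySem.List.pyGetD ((runsUp signal.reverse).reverse) i 0)
      (fun i => PySem.List.pyGetD signal (i - 1) 0 > PySem.List.pyGetD signal (i + 1) 0)
      (fun i => [i - 1, i]) (fun i => [i, i + 1])]
  simp only [List.nil_append]
  congr 1
  apply List.filter_congr
  intro i hi
  rw [PySem.List.mem_pyRange_one] at hi
  exact cond_eq signal support i hs hi.1 hi.2

-- ===== VERDICT (by name: the statement is the Claim_ definition above) =====
theorem identify_peak_indicies_py_spec : Claim_equal_identify_peak_indicies_py := by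
  intro signal support _ hpre
  unfold Spec_identify_peak_indicies_py
  rcases hpre with hs | ⟨h0, hnil⟩
  · exact main_eq signal support hs
  · subst h0; subst hnil; decide
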